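-- pv_equiv track=rewrite | github.com/Samluiz2025/Trading-Project | trading_bot/core/fractal_engine.py | _swing_alternation_score
-- ===== SOURCE A (Python) =====
-- from typing import Any
--
-- def _swing_alternation_score(swings: list[dict[str, Any]]) -> int:
--     if len(swings) < 2:
--         return 0
--     score = 0
--     previous_type = swings[0]["type"]
--     for swing in swings[1:]:
--         current_type = swing["type"]
--         if current_type != previous_type:
--             score += 1
--         previous_type = current_type
--     return score
-- ===== SOURCE B (Python) =====
-- from typing import Any
--
-- def _swing_alternation_score(swings: list[dict[str, Any]]) -> int:
--     if len(swings) < 2: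
--         return 0
--     types = [s["type"] for s in swings]
--
--     def solve(ts: list) -> int:
--         # number of adjacent unequal pairs in ts, by divide and conquer:
--         # changes in the two halves plus the change (or not) at the split point
--         if len(ts) < 2:
--             return 0
--         mid = len(ts) // 2
--         boundary = 1 if ts[mid - 1] != ts[mid] else 0
--         return solve(ts[:mid]) + solve(ts[mid:]) + boundary
--
--     return solve(types)
-- ===== Notes on version B (the rewrite author's own statement) =====
-- stated objective: alternative
-- what changed: Replaces A's single linear pass with previous_type tracking by a divide-and-conquer recursion: split the type sequence at the midpoint, count alternations in each half recursively, and add the comparison at the split boundary.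
import Mathlib
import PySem

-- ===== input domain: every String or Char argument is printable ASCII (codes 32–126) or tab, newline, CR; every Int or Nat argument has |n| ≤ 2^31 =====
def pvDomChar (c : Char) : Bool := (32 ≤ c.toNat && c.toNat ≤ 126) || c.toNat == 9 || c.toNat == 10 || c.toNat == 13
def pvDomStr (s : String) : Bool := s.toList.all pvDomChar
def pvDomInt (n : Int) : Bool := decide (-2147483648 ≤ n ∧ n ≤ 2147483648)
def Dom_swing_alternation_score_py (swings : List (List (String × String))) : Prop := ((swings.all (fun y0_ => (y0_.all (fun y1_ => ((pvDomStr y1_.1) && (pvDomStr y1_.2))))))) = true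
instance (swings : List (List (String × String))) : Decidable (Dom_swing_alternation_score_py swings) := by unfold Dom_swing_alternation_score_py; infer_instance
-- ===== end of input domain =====

-- B replaces A's previous_type-tracking linear pass with a divide-and-conquer recursion
-- (count alternations in each half of the type list, plus the split boundary); alternative
-- structure, not faster.

-- swing["type"]: first-match dict lookup; the .getD "" default is never reached under
-- Pre_ (every dict contains the key "type" there), where Python would raise KeyError.
def pvTypeOf (d : List (String × String)) : String :=
  ((PySem.Dict.mk d).get? "type").getD ""

-- ===== PORT A =====
def swing_alternation_score_py (swings : List (List (String × String))) : Int :=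
  if swings.length < 2 then 0
  else
    -- score = 0; previous_type = swings[0]["type"]; for swing in swings[1:]: …
    let previous_type := pvTypeOf (swings.headD [])
    let st := (PySem.List.slice swings (some 1) none).foldl
      (fun (acc : Int × String) swing =>
        let current_type := pvTypeOf swing
        (if current_type ≠ acc.2 then acc.1 + 1 else acc.1, current_type))
      (0, previous_type)
    st.1

-- ===== PORT B =====
-- solve(ts): if len(ts) < 2: 0 else solve(ts[:mid]) + solve(ts[mid:]) + boundary,
-- mid = len(ts)//2.  ts[mid-1], ts[mid] are in range under the guard, so pyGetD is exact.
def pvSolve (ts : List String) : Int :=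
  if _h : ts.length < 2 then 0
  else
    let mid : Nat := ts.length / 2
    let boundary : Int :=
      if PySem.List.pyGetD ts ((mid : Int) - 1) "" ≠ PySem.List.pyGetD ts (mid : Int) "" then 1 else 0
    pvSolve (PySem.List.slice ts none (some (mid : Int))) +
      pvSolve (PySem.List.slice ts (some (mid : Int)) none) + boundary
termination_by ts.length
decreasing_by
  · simp only [PySem.List.slice_to_natCast, List.length_take]; omega
  · simp only [PySem.List.slice_from_natCast, List.length_drop]; omega

def swing_alternation_score_py_alt (swings : List (List (String × String))) : Int :=
  if swings.length < 2 then 0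
  else pvSolve (swings.map pvTypeOf)

-- ===== PRECONDITION & SPEC =====
-- Pre_ excludes exactly the inputs where A raises KeyError: with ≥ 2 swings, some dict lacks "type".
def Pre_swing_alternation_score_py (swings : List (List (String × String))) : Prop :=
  swings.length < 2 ∨ ∀ d ∈ swings, (PySem.Dict.mk d).contains "type" = true
instance (swings : List (List (String × String))) : Decidable (Pre_swing_alternation_score_py swings) := by unfold Pre_swing_alternation_score_py; infer_instance
def pvWitness_swing_alternation_score_py : (List (List (String × String))) :=
  [[("type", "HIGH")], [("type", "LOW")], [("type", "LOW")]]
def Spec_swing_alternation_score_py (swings : List (List (String × String))) (out : Int) : Prop := out = swing_alternation_score_py_alt swings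
instance (swings : List (List (String × String))) (out : Int) : Decidable (Spec_swing_alternation_score_py swings out) := by unfold Spec_swing_alternation_score_py; infer_instance

-- ===== CLAIM =====
def Claim_equal_swing_alternation_score_py : Prop := ∀ (swings : List (List (String × String))), Dom_swing_alternation_score_py swings → Pre_swing_alternation_score_py swings → Spec_swing_alternation_score_py swings (swing_alternation_score_py swings)

-- ===== LEMMAS AND PROOFS =====
-- number of adjacent unequal pairs, the common characterisation of both ports
def pvAdj : List String → Int
  | [] => 0
  | [_] => 0
  | x :: y :: r => (if x ≠ y then 1 else 0) + pvAdj (y :: r)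

theorem pvAdj_append (a y : String) (ys : List String) : ∀ (xs : List String),
    pvAdj ((xs ++ [a]) ++ y :: ys) = pvAdj (xs ++ [a]) + pvAdj (y :: ys) + (if a ≠ y then 1 else 0) := by
  intro xs
  induction xs with
  | nil => simp [pvAdj]; ring
  | cons x xs ih =>
    cases xs with
    | nil => simp [pvAdj]; ring
    | cons z w =>
      simp only [List.cons_append, pvAdj] at ih ⊢
      rw [ih]; ring

theorem pvSolve_eq_adj : ∀ (n : Nat) (ts : List String), ts.length ≤ n → pvSolve ts = pvAdj ts := by
  intro n
  induction n with
  | zero =>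
    intro ts h
    have : ts = [] := List.eq_nil_of_length_eq_zero (Nat.le_zero.mp h)
    subst this; rw [pvSolve]; simp [pvAdj]
  | succ n ih =>
    intro ts hlen
    rw [pvSolve]
    by_cases h : ts.length < 2
    · simp only [h, dif_pos]
      match ts, h with
      | [], _ => rfl
      | [x], _ => rfl
    · simp only [h, dif_neg, not_false_iff]
      set m := ts.length / 2 with hm
      have h2 : 2 ≤ ts.length := Nat.not_lt.mp h
      have hm1 : 1 ≤ m := by omega
      have hmlt : m < ts.length := by omega
      have hm1lt : m - 1 < ts.length := by omega
      rw [PySem.List.slice_to_natCast, PySem.List.slice_from_natCast]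
      -- the two indexings are in range
      have hc1 : ((m : Int) - 1) = ((m - 1 : Nat) : Int) := by omega
      rw [hc1, PySem.List.pyGetD_natCast, PySem.List.pyGetD_natCast,
        List.getD_eq_getElem ts "" hm1lt, List.getD_eq_getElem ts "" hmlt]
      -- recursive calls via ih
      rw [ih (ts.take m) (by simp [List.length_take]; omega),
        ih (ts.drop m) (by simp [List.length_drop]; omega)]
      -- decompose ts at the split point
      have htake : ts.take m = ts.take (m - 1) ++ [ts[m - 1]] := by
        have hsplit : m = (m - 1) + 1 := by omega
        conv_lhs => rw [hsplit, List.take_add_one]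
        simp [List.getElem?_eq_getElem hm1lt]
      have hdrop : ts.drop m = ts[m] :: ts.drop (m + 1) := List.drop_eq_getElem_cons hmlt
      conv_rhs => rw [← List.take_append_drop m ts, htake, hdrop]
      rw [pvAdj_append, htake, hdrop]

-- A's loop over the tail, started at (s, p), computes s + adjacent changes of p :: tail-types.
theorem pvLoop_eq (ts : List (List (String × String))) : ∀ (s : Int) (p : String),
    (ts.foldl
      (fun (acc : Int × String) swing =>
        (if pvTypeOf swing ≠ acc.2 then acc.1 + 1 else acc.1, pvTypeOf swing))
      (s, p)).1 = s + pvAdj (p :: ts.map pvTypeOf) := by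
  induction ts with
  | nil => intro s p; simp [pvAdj]
  | cons t rest ih =>
    intro s p
    simp only [List.foldl_cons, List.map_cons]
    rw [ih]
    by_cases h : pvTypeOf t = p
    · simp [pvAdj, h]
    · simp [pvAdj, h, Ne.symm h]
      ring

-- ===== VERDICT =====
theorem swing_alternation_score_py_spec : Claim_equal_swing_alternation_score_py := by
  intro swings _ _
  unfold Spec_swing_alternation_score_py swing_alternation_score_py swing_alternation_score_py_alt
  by_cases hlen : swings.length < 2
  · simp [hlen]
  · simp only [hlen, if_false]
    match swings, hlen with
    | d :: rest, _ =>
      rw [PySem.List.slice_from_one]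
      simp only [List.tail_cons, List.headD_cons]
      rw [pvLoop_eq, pvSolve_eq_adj ((d :: rest).map pvTypeOf).length _ le_rfl]
      simp
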